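-- pv_equiv track=rewrite | github.com/nageseio/The-Huxley | Projeto/New.py | ExtracaoPetrick
-- ===== SOURCE A (Python) =====
-- def Multiplicador(Termo1,Termo2):#Multiplica variaveis em listas, retorna resultadoda multiplicação
--     M=[]
--     for i in Termo1:
--         for i2 in Termo2:
--             if i2== i:
--                 M.append(i)
--             elif i2 not in i:
--                 x = i+i2
--                 if x not in M:
--                     M.append(x)
--     return M
--
-- def ExtracaoPetrick(Lista):#Retorna um lista contendo as possibilidas, da expressao minimizada
--     ListaExt=[]
--     x = len(Lista)
--     if x == 1:
--         return Lista
--     if x%2 == 0: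
--         c1=0
--         c=1
--         for i in range(int(x/2)):
--             y = Multiplicador(Lista[c1],Lista[c])
--             ListaExt.append(y)
--             c1+=2
--             c+=2
--     else:
--         c1=0
--         c=1
--         for i in range((x//2)):
--             ListaExt.append(Multiplicador(Lista[c1],Lista[c]))
--             c1+=2
--             c+=2
--         ListaExt.append(Lista[-1])
--     return ExtracaoPetrick(ListaExt)
-- ===== SOURCE B (Python) =====
-- def Multiplicador(Termo1, Termo2):
--     M = []
--     for i in Termo1:
--         for i2 in Termo2:
--             if i2 == i:
--                 M.append(i)
--             elif i2 not in i:
--                 x = i + i2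
--                 if x not in M:
--                     M.append(x)
--     return M
--
-- def ExtracaoPetrick(Lista):
--     while len(Lista) > 1:
--         nxt = [Multiplicador(a, b) for a, b in zip(Lista[::2], Lista[1::2])]
--         if len(Lista) % 2:
--             nxt.append(Lista[-1])
--         Lista = nxt
--     return Lista
-- ===== Notes on version B (the rewrite author's own statement) =====
-- stated objective: simpler
-- what changed: Replaced A's recursion with parity-split counter loops by a single iterative while loop that pairs adjacent terms via strided slices and zip, with one unified odd-leftover append.
import Mathlib
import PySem

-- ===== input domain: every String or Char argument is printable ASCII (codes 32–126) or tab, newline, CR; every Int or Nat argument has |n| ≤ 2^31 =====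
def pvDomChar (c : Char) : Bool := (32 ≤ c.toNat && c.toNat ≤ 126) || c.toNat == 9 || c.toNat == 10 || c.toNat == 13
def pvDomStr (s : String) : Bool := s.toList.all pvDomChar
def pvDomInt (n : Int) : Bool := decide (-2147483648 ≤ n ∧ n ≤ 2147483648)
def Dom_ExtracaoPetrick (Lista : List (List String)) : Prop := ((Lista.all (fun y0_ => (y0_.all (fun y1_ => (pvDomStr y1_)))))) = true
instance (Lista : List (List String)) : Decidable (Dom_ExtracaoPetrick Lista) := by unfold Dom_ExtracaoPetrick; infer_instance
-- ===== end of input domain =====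

-- B replaces A's recursion with an explicit while loop pairing adjacent terms via strided
-- slices and zip (objective: simpler iterative decomposition; same cost).


-- ===== PORT A =====
-- shared helper, used verbatim by both Pythons ('i2 not in i' is Python's substring test)
def Multiplicador (Termo1 Termo2 : List String) : List String :=
  Termo1.foldl (fun M i =>
    Termo2.foldl (fun M i2 =>
      if i2 = i then M ++ [i]
      else if ¬ PySem.Str.isIn i2 i then
        (let x := i ++ i2; if x ∉ M then M ++ [x] else M)
      else M) M) []

-- A's recursion, with fuel only to make it total in Lean (fuel = length always suffices on
-- Lista ≠ []: each level at least halves the length; on [] A's Python recurses forever).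
def ExtracaoPetrickFuel : Nat → List (List String) → List (List String)
  | 0, Lista => Lista
  | fuel + 1, Lista =>
    let x := Lista.length
    if x = 1 then Lista
    else if x % 2 = 0 then
      -- for i in range(int(x/2)): ListaExt.append(...); c1+=2; c+=2
      let st := (PySem.List.pyRange 0 ((x / 2 : Nat) : Int) 1).foldl
        (fun (p : List (List String) × Int × Int) _ =>
          (p.1 ++ [Multiplicador (PySem.List.pyGetD Lista p.2.1 []) (PySem.List.pyGetD Lista p.2.2 [])],
           p.2.1 + 2, p.2.2 + 2)) ([], 0, 1)
      ExtracaoPetrickFuel fuel st.1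
    else
      let st := (PySem.List.pyRange 0 ((x / 2 : Nat) : Int) 1).foldl
        (fun (p : List (List String) × Int × Int) _ =>
          (p.1 ++ [Multiplicador (PySem.List.pyGetD Lista p.2.1 []) (PySem.List.pyGetD Lista p.2.2 [])],
           p.2.1 + 2, p.2.2 + 2)) ([], 0, 1)
      ExtracaoPetrickFuel fuel (st.1 ++ [PySem.List.pyGetD Lista (-1) []])

def ExtracaoPetrick (Lista : List (List String)) : List (List String) :=
  ExtracaoPetrickFuel Lista.length Lista

-- ===== PORT B =====
-- xs[::2] (step-2 slice from 0), ported by hand (PySem.List.slice has no step): exact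
def stride2 : List (List String) → List (List String)
  | [] => []
  | [a] => [a]
  | a :: _ :: t => a :: stride2 t

-- one iteration of B's while body
def altStep (Lista : List (List String)) : List (List String) :=
  let nxt := ((stride2 Lista).zip (stride2 (PySem.List.slice Lista (some 1) none))).map
    (fun p => Multiplicador p.1 p.2)
  if Lista.length % 2 ≠ 0 then nxt ++ [PySem.List.pyGetD Lista (-1) []] else nxt

-- B's while loop, with the same fuel bound (fuel = length suffices: the guard needs
-- length > 1 and then altStep strictly shrinks the list)
def altLoop : Nat → List (List String) → List (List String)
  | 0, Lista => Lista
  | fuel + 1, Lista => if Lista.length > 1 then altLoop fuel (altStep Lista) else Lista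

def ExtracaoPetrick_alt (Lista : List (List String)) : List (List String) :=
  altLoop Lista.length Lista

-- ===== PRECONDITION & SPEC =====
-- Pre_ excludes only the empty list, on which A's Python recurses forever (RecursionError).
def Pre_ExtracaoPetrick (Lista : List (List String)) : Prop := Lista ≠ []
instance (Lista : List (List String)) : Decidable (Pre_ExtracaoPetrick Lista) := by
  unfold Pre_ExtracaoPetrick; infer_instance
def pvWitness_ExtracaoPetrick : List (List String) := [["a", "b"], ["c"]]

def Spec_ExtracaoPetrick (Lista : List (List String)) (out : List (List String)) : Prop :=
  out = ExtracaoPetrick_alt Lista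
instance (Lista : List (List String)) (out : List (List String)) :
    Decidable (Spec_ExtracaoPetrick Lista out) := by unfold Spec_ExtracaoPetrick; infer_instance

-- ===== CLAIM (what is proved, stated in full; the proofs are below) =====
def Claim_equal_ExtracaoPetrick : Prop := ∀ (Lista : List (List String)),
  Dom_ExtracaoPetrick Lista → Pre_ExtracaoPetrick Lista →
  Spec_ExtracaoPetrick Lista (ExtracaoPetrick Lista)
-- ===== LEMMAS AND PROOFS =====

-- the common one-level combinator both step computations are shown equal to
def pairUp : List (List String) → List (List String)
  | a :: b :: t => Multiplicador a b :: pairUp t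
  | l => l

-- A's counter loop, unrolled: after n iterations starting at counters (2j, 2j+1)
theorem foldA_eq (L : List (List String)) (n j : Nat) (acc : List (List String)) :
    (PySem.List.pyRange 0 (n : Int) 1).foldl
      (fun (p : List (List String) × Int × Int) _ =>
        (p.1 ++ [Multiplicador (PySem.List.pyGetD L p.2.1 []) (PySem.List.pyGetD L p.2.2 [])],
         p.2.1 + 2, p.2.2 + 2)) (acc, ((2 * j : Nat) : Int), ((2 * j + 1 : Nat) : Int))
    = ((acc ++ (List.range n).map (fun k =>
        Multiplicador (L.getD (2 * (j + k)) []) (L.getD (2 * (j + k) + 1) [])),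
       ((2 * (j + n) : Nat) : Int), ((2 * (j + n) + 1 : Nat) : Int))
       : List (List String) × Int × Int) := by
  induction n generalizing j acc with
  | zero =>
    rw [show ((0 : Nat) : Int) = 0 from rfl,
        show PySem.List.pyRange 0 0 1 = [] from by decide]
    simp
  | succ n ih =>
    have hr : PySem.List.pyRange 0 ((n + 1 : Nat) : Int) 1
        = PySem.List.pyRange 0 (n : Int) 1 ++ [(n : Int)] := by
      push_cast
      exact PySem.List.pyRange_one_succ_right (by exact_mod_cast Nat.zero_le n)
    rw [hr, List.foldl_append, ih]
    simp only [List.foldl_cons, List.foldl_nil, PySem.List.pyGetD_natCast, Prod.mk.injEq]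
    refine ⟨?_, ?_, ?_⟩
    · rw [List.range_succ, List.map_append, List.map_cons, List.map_nil, List.append_assoc]
    · push_cast; ring
    · push_cast; ring

-- pyGetD at -1 as getLast?.getD
theorem pyGetD_last (L : List (List String)) (h : L ≠ []) :
    PySem.List.pyGetD L (-1) [] = (L.getLast?).getD [] := by
  rw [PySem.List.pyGetD_neg_one L [] h]
  simp [List.getLast?_eq_some_getLast h]

-- the map-form of A's one level equals pairUp
theorem mapForm_eq_pairUp : ∀ (L : List (List String)),
    ((List.range (L.length / 2)).map (fun k =>
        Multiplicador (L.getD (2 * k) []) (L.getD (2 * k + 1) []))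
      ++ (if L.length % 2 ≠ 0 then [(L.getLast?).getD []] else []))
    = pairUp L
  | [] => by simp [pairUp]
  | [a] => by simp [pairUp]
  | a :: b :: t => by
    have ih := mapForm_eq_pairUp t
    have hlen : (a :: b :: t).length / 2 = t.length / 2 + 1 := by
      simp only [List.length_cons]; omega
    have hmod : (a :: b :: t).length % 2 = t.length % 2 := by
      simp only [List.length_cons]; omega
    rw [hlen, hmod, List.range_succ_eq_map, List.map_cons, List.map_map]
    have hshift : List.map ((fun k => Multiplicador ((a :: b :: t).getD (2 * k) [])
        ((a :: b :: t).getD (2 * k + 1) [])) ∘ Nat.succ) (List.range (t.length / 2))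
        = (List.range (t.length / 2)).map (fun k =>
            Multiplicador (t.getD (2 * k) []) (t.getD (2 * k + 1) [])) := by
      apply List.map_congr_left
      intro k _
      have e1 : 2 * (k + 1) = 2 * k + 1 + 1 := by ring
      simp [Function.comp, e1]
    rw [hshift]
    have h0 : (a :: b :: t).getD (2 * 0) ([] : List String) = a := rfl
    have h1 : (a :: b :: t).getD (2 * 0 + 1) ([] : List String) = b := rfl
    rw [h0, h1, List.cons_append]
    show Multiplicador a b :: _ = pairUp (a :: b :: t)
    rw [show pairUp (a :: b :: t) = Multiplicador a b :: pairUp t from rfl]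
    congr 1
    rw [← ih]
    by_cases hmt : t.length % 2 = 0
    · simp [hmt]
    · have ht : t ≠ [] := by
        intro h; rw [h] at hmt; simp at hmt
      have hlast : ((a :: b :: t).getLast?).getD ([] : List String)
          = (t.getLast?).getD [] := by
        cases t with
        | nil => exact absurd rfl ht
        | cons c u => rw [List.getLast?_cons_cons, List.getLast?_cons_cons]
      simp only [hmt, ne_eq, not_false_iff, if_true, hlast]

-- A's one recursion level: either the x == 1 early return or one pairUp step
theorem fuelA_succ (fuel : Nat) (L : List (List String)) :
    ExtracaoPetrickFuel (fuel + 1) L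
      = if L.length = 1 then L else ExtracaoPetrickFuel fuel (pairUp L) := by
  have hf := foldA_eq L (L.length / 2) 0 []
  simp only [Nat.mul_zero, Nat.zero_add, Nat.cast_zero, Nat.cast_one] at hf
  have hmap := mapForm_eq_pairUp L
  simp only [ExtracaoPetrickFuel]
  split_ifs with h1 hev
  · rfl
  · rw [hf]
    congr 1
    have hne : ¬ L.length % 2 ≠ 0 := by omega
    simp only [hne, if_false, List.append_nil] at hmap
    simpa using hmap
  · rw [hf]
    have hnil : L ≠ [] := by
      intro h; rw [h] at hev; simp at hev
    rw [pyGetD_last L hnil]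
    congr 1
    have hodd : L.length % 2 ≠ 0 := hev
    simp only [hodd, ne_eq, not_false_iff, if_true] at hmap
    simpa using hmap

-- B's one level equals pairUp, two elements at a time
theorem altStep_eq_pairUp : ∀ (L : List (List String)), altStep L = pairUp L
  | [] => by simp [altStep, pairUp, PySem.List.slice_from_one, stride2]
  | [a] => by
    have h := pyGetD_last [a] (by simp)
    simp [altStep, pairUp, PySem.List.slice_from_one, stride2, h]
  | a :: b :: t => by
    have ih := altStep_eq_pairUp t
    unfold altStep at ih ⊢
    rw [PySem.List.slice_from_one] at ih ⊢
    have hmod : (a :: b :: t).length % 2 = t.length % 2 := by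
      simp only [List.length_cons]; omega
    cases t with
    | nil => simp [stride2, pairUp]
    | cons c u =>
      have hzip : ((stride2 (a :: b :: c :: u)).zip
          (stride2 (List.tail (a :: b :: c :: u)))).map
            (fun p => Multiplicador p.1 p.2)
          = Multiplicador a b :: ((stride2 (c :: u)).zip
              (stride2 (List.tail (c :: u)))).map (fun p => Multiplicador p.1 p.2) := by
        cases u with
        | nil => simp [stride2]
        | cons d v => simp [stride2]
      rw [hzip, hmod]
      by_cases hmt : (c :: u).length % 2 = 0
      · simp only [hmt, ne_eq, not_true_eq_false, if_false] at ih ⊢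
        rw [show pairUp (a :: b :: c :: u) = Multiplicador a b :: pairUp (c :: u) from rfl,
            ← ih]
      · have hl : PySem.List.pyGetD (a :: b :: c :: u) (-1) ([] : List String)
            = PySem.List.pyGetD (c :: u) (-1) [] := by
          rw [pyGetD_last _ (by simp), pyGetD_last _ (by simp),
              List.getLast?_cons_cons, List.getLast?_cons_cons]
        simp only [hmt, ne_eq, not_false_iff, if_true] at ih ⊢
        rw [show pairUp (a :: b :: c :: u) = Multiplicador a b :: pairUp (c :: u) from rfl,
            ← ih, hl, List.cons_append]

theorem pairUp_ne_nil (L : List (List String)) (h : 1 < L.length) : pairUp L ≠ [] := by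
  match L, h with
  | a :: b :: t, _ => simp [pairUp]

theorem loops_eq (fuel : Nat) : ∀ (L : List (List String)), L ≠ [] →
    ExtracaoPetrickFuel fuel L = altLoop fuel L := by
  induction fuel with
  | zero => intro L _; rfl
  | succ fuel ih =>
    intro L hL
    rw [fuelA_succ]
    simp only [altLoop]
    have hlen : 1 ≤ L.length := by
      cases L with
      | nil => exact absurd rfl hL
      | cons a t => simp
    by_cases h1 : L.length = 1
    · rw [if_pos h1, if_neg (by omega)]
    · rw [if_neg h1, if_pos (by omega), altStep_eq_pairUp]
      exact ih (pairUp L) (pairUp_ne_nil L (by omega))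

-- ===== VERDICT (by name: the statement is the Claim_ definition above) =====
theorem ExtracaoPetrick_spec : Claim_equal_ExtracaoPetrick := by
  intro L _ hpre
  unfold Spec_ExtracaoPetrick ExtracaoPetrick ExtracaoPetrick_alt
  exact loops_eq L.length L hpre
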